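-- pv_equiv track=rewrite | github.com/KolodziejczykR/BaseballPath | backend/school_filtering/async_two_tier_pipeline.py | _sat_to_act
-- ===== SOURCE A (Python) =====
-- def _sat_to_act(sat_score: int) -> int:
--     """
--     Converts an SAT total score to an approximate ACT composite score
--     using a concordance table.
--
--     Args:
--         sat_score (int): The total SAT score (400-1600).
--
--     Returns:
--         int or str: The approximate ACT composite score (1-36) or an error message
--                     if the input is invalid.
--     """
--     if not isinstance(sat_score, int) or not (400 <= sat_score <= 1600):
--         return "Invalid SAT score. Please enter an integer between 400 and 1600."
--
--     # Official concordance tables provide ranges. This dictionary maps the *lower bound*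
--     # of an SAT range to its corresponding ACT score.
--     # The ranges are based on recent concordance data.
--     concordance_table = {
--         1570: 36, 1530: 35, 1490: 34, 1450: 33, 1420: 32,
--         1390: 31, 1350: 30, 1320: 29, 1290: 28, 1250: 27,
--         1220: 26, 1190: 25, 1150: 24, 1120: 23, 1090: 22,
--         1060: 21, 1030: 20, 990: 19, 960: 18, 920: 17,
--         880: 16, 830: 15, 780: 14, 730: 13, 690: 12,
--         650: 11, 620: 10, 590: 9, 560: 8, 530: 7,
--         500: 6, 470: 5, 440: 4, 410: 3, 400: 2
--         # Note: lowest ACT score is 1, but lowest SAT conversion is 2-3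
--     }
--
--     # Find the closest matching SAT score range (iterating from highest to lowest)
--     for sat_lower_bound, act_score in sorted(concordance_table.items(), reverse=True):
--         if sat_score >= sat_lower_bound:
--             return act_score
--
--     # If the score is below the lowest defined range but still valid (e.g., 400-409),
--     # it maps to the lowest ACT score in the table.
--     return 1 # Lowest possible ACT score
-- ===== SOURCE B (Python) =====
-- # Same guard and error string as the original; the lookup is a binary search
-- # over a precomputed ascending threshold table instead of a linear descending scan.
--
-- _SAT_THRESHOLDS = [400, 410, 440, 470, 500, 530, 560, 590, 620, 650, 690, 730,
--                    780, 830, 880, 920, 960, 990, 1030, 1060, 1090, 1120, 1150,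
--                    1190, 1220, 1250, 1290, 1320, 1350, 1390, 1420, 1450, 1490,
--                    1530, 1570]
-- _ACT_SCORES = [2, 3, 4, 5, 6, 7, 8, 9, 10, 11, 12, 13, 14, 15, 16, 17, 18, 19,
--                20, 21, 22, 23, 24, 25, 26, 27, 28, 29, 30, 31, 32, 33, 34, 35, 36]
--
--
-- def _sat_to_act(sat_score: int) -> int:
--     if not isinstance(sat_score, int) or not (400 <= sat_score <= 1600):
--         return "Invalid SAT score. Please enter an integer between 400 and 1600."
--     # bisect_right by hand: first index with thresholds[idx] > sat_score
--     lo, hi = 0, len(_SAT_THRESHOLDS)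
--     while lo < hi:
--         mid = (lo + hi) // 2
--         if sat_score < _SAT_THRESHOLDS[mid]:
--             hi = mid
--         else:
--             lo = mid + 1
--     # guard guarantees sat_score >= 400 == smallest threshold, so lo >= 1
--     return _ACT_SCORES[lo - 1]
-- ===== Notes on version B (the rewrite author's own statement) =====
-- stated objective: alternative
-- what changed: Replaces the linear descending scan over the concordance dict with a hand-written bisect_right binary search over a precomputed ascending threshold list paralleled by an ACT-score list.
import Mathlib
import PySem

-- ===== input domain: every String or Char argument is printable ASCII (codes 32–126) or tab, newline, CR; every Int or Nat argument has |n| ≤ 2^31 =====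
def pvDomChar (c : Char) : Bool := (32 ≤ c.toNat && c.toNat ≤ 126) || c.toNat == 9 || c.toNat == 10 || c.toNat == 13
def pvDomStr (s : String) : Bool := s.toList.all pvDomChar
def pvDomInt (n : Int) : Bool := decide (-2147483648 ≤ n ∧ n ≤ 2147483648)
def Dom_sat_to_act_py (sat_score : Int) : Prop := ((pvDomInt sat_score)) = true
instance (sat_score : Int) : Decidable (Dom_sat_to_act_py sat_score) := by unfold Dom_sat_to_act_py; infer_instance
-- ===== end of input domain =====

-- B replaces A's linear descending scan of the concordance table with a binary search over
-- ascending thresholds (alternative algorithm; A's invalid-input error string is outside Pre_).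

set_option maxRecDepth 4000


-- ===== PORT A =====
-- concordance_table in dict insertion order
def pvTableA : List (Int × Int) :=
  [(1570, 36), (1530, 35), (1490, 34), (1450, 33), (1420, 32),
   (1390, 31), (1350, 30), (1320, 29), (1290, 28), (1250, 27),
   (1220, 26), (1190, 25), (1150, 24), (1120, 23), (1090, 22),
   (1060, 21), (1030, 20), (990, 19), (960, 18), (920, 17),
   (880, 16), (830, 15), (780, 14), (730, 13), (690, 12),
   (650, 11), (620, 10), (590, 9), (560, 8), (530, 7),
   (500, 6), (470, 5), (440, 4), (410, 3), (400, 2)]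

-- the for-loop: first (bound, act) with sat_score >= bound, else the trailing 'return 1'
def pvLoopA (sat_score : Int) : List (Int × Int) → Int
  | [] => 1
  | (b, a) :: rest => if b ≤ sat_score then a else pvLoopA sat_score rest

def sat_to_act_py (sat_score : Int) : Int :=
  if ¬ (400 ≤ sat_score ∧ sat_score ≤ 1600) then
    -1  -- Python returns an error STRING here; outside Pre_, placeholder value
  else
    pvLoopA sat_score (PySem.List.sorted pvTableA (fun p => p.1) true)

-- ===== PORT B =====
def pvThresholds : List Int :=
  [400, 410, 440, 470, 500, 530, 560, 590, 620, 650, 690, 730,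
   780, 830, 880, 920, 960, 990, 1030, 1060, 1090, 1120, 1150,
   1190, 1220, 1250, 1290, 1320, 1350, 1390, 1420, 1450, 1490, 1530, 1570]

def pvActs : List Int :=
  [2, 3, 4, 5, 6, 7, 8, 9, 10, 11, 12, 13, 14, 15, 16, 17, 18, 19,
   20, 21, 22, 23, 24, 25, 26, 27, 28, 29, 30, 31, 32, 33, 34, 35, 36]

-- hand-written bisect_right while-loop; fuel = list length bounds the iterations
-- (hi - lo shrinks each step, so pvThresholds.length iterations always suffice)
def pvBisect (sat_score : Int) : Nat → Nat → Nat → Nat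
  | 0, lo, _ => lo
  | fuel + 1, lo, hi =>
    if lo < hi then
      let mid := (lo + hi) / 2
      if sat_score < pvThresholds.getD mid 0 then pvBisect sat_score fuel lo mid
      else pvBisect sat_score fuel (mid + 1) hi
    else lo

def sat_to_act_py_alt (sat_score : Int) : Int :=
  if ¬ (400 ≤ sat_score ∧ sat_score ≤ 1600) then
    -1  -- Python returns an error STRING here; outside Pre_, placeholder value
  else
    pvActs.getD (pvBisect sat_score pvThresholds.length 0 pvThresholds.length - 1) 0

-- ===== PRECONDITION & SPEC =====
-- Pre_ excludes exactly the inputs on which Python A returns the error STRING (not an int): sat_score outside 400..1600.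
def Pre_sat_to_act_py (sat_score : Int) : Prop := 400 ≤ sat_score ∧ sat_score ≤ 1600
instance (sat_score : Int) : Decidable (Pre_sat_to_act_py sat_score) := by unfold Pre_sat_to_act_py; infer_instance
def pvWitness_sat_to_act_py : Int := 1200

def Spec_sat_to_act_py (sat_score : Int) (out : Int) : Prop := out = sat_to_act_py_alt sat_score
instance (sat_score : Int) (out : Int) : Decidable (Spec_sat_to_act_py sat_score out) := by unfold Spec_sat_to_act_py; infer_instance

-- ===== CLAIM (what is proved, stated in full; the proofs are below) =====
def Claim_equal_sat_to_act_py : Prop := ∀ (sat_score : Int), Dom_sat_to_act_py sat_score → Pre_sat_to_act_py sat_score → Spec_sat_to_act_py sat_score (sat_to_act_py sat_score)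

-- ===== LEMMAS AND PROOFS =====

-- the sort is input-independent: name its value once
lemma pvSortedA_eq : PySem.List.sorted pvTableA (fun p => p.1) true = pvTableA := by decide

lemma pvRange_check : ∀ n : Nat, n < 1201 →
    pvLoopA ((400 : Int) + n) pvTableA
      = pvActs.getD (pvBisect ((400 : Int) + n) pvThresholds.length 0 pvThresholds.length - 1) 0 := by decide

-- ===== VERDICT (by name: the statement is the Claim_ definition above) =====
theorem sat_to_act_py_spec : Claim_equal_sat_to_act_py := by
  intro s _dom hpre
  unfold Spec_sat_to_act_py sat_to_act_py sat_to_act_py_alt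
  obtain ⟨h1, h2⟩ := hpre
  rw [if_neg (by omega), if_neg (by omega), pvSortedA_eq]
  have hn : s = (400 : Int) + (s - 400).toNat := by omega
  have hlt : (s - 400).toNat < 1201 := by omega
  rw [hn]
  exact pvRange_check _ hlt
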